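-- pv_equiv track=rewrite | github.com/aparfenen/grna-inspector | src/grna_inspector/feature_extraction.py | _max_purine_run
-- ===== SOURCE A (Python) =====
-- def _max_purine_run(seq: str) -> int:
--     """Find maximum run of purines (A or G)."""
--     max_run = 0
--     current_run = 0
--     for nt in seq:
--         if nt in 'AG':
--             current_run += 1
--             max_run = max(max_run, current_run)
--         else:
--             current_run = 0
--     return max_run
-- ===== SOURCE B (Python) =====
-- def _max_purine_run(seq: str) -> int:
--     """Find maximum run of purines (A or G): jump run-by-run instead of a per-char counter."""
--     best = 0
--     i = 0
--     n = len(seq)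
--     while i < n:
--         if seq[i] in 'AG':
--             j = i
--             while j < n and seq[j] in 'AG':
--                 j += 1
--             best = max(best, j - i)
--             i = j
--         else:
--             i += 1
--     return best
-- ===== Notes on version B (the rewrite author's own statement) =====
-- stated objective: alternative
-- what changed: B replaces A's per-character running-counter fold with a run-decomposition two-pointer scan: at each run start it advances an inner pointer to the end of the maximal purine run and maxes over run lengths, skipping runs as whole blocks.
import Mathlib
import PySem

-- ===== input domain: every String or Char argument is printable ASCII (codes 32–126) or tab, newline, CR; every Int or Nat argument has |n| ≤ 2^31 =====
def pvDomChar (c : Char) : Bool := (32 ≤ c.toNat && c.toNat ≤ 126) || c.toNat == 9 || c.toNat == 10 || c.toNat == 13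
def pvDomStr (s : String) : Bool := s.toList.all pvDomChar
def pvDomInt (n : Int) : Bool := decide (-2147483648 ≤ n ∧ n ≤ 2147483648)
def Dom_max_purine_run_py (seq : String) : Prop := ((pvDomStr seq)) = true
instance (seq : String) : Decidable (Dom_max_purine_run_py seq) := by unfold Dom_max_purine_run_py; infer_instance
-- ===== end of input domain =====

-- B replaces A's per-character running-counter fold with a two-pointer scan that jumps
-- over each maximal purine run as a block (objective: alternative; same cost).

-- ===== PORT A =====
-- 'nt in "AG"' (used verbatim by both Pythons)
def pvPurine (c : Char) : Bool := c == 'A' || c == 'G'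

def max_purine_run_py (seq : String) : Int :=
  (seq.toList.foldl
    (fun (st : Int × Int) nt =>
      if pvPurine nt then (max st.1 (st.2 + 1), st.2 + 1) else (st.1, 0))
    (0, 0)).1

-- ===== PORT B =====
-- inner 'while j < n and seq[j] in "AG": j += 1'
def pvInner (l : List Char) (n j : Nat) : Nat :=
  if h : j < n ∧ pvPurine (l.getD j ' ') then pvInner l n (j + 1) else j
termination_by n - j
decreasing_by omega

theorem pvInner_ge (l : List Char) (n j : Nat) : j ≤ pvInner l n j := by
  induction j using pvInner.induct l n with
  | case1 j h ih => rw [pvInner, dif_pos h]; omega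
  | case2 j h => rw [pvInner, dif_neg h]

-- outer 'while i < n: …'
def pvOuter (l : List Char) (n : Nat) (best : Int) (i : Nat) : Int :=
  if h : i < n then
    if hp : pvPurine (l.getD i ' ') then
      let j := pvInner l n i
      pvOuter l n (max best ((j : Int) - (i : Int))) j
    else pvOuter l n best (i + 1)
  else best
termination_by n - i
decreasing_by
  · have h1 : i + 1 ≤ pvInner l n (i + 1) := pvInner_ge l n (i + 1)
    have h2 : pvInner l n i = pvInner l n (i + 1) := by
      rw [pvInner, dif_pos ⟨h, hp⟩]
    omega
  · omega

def max_purine_run_py_alt (seq : String) : Int :=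
  pvOuter seq.toList seq.toList.length 0 0

-- ===== PRECONDITION & SPEC =====
def Spec_max_purine_run_py (seq : String) (out : Int) : Prop := out = max_purine_run_py_alt seq
instance (seq : String) (out : Int) : Decidable (Spec_max_purine_run_py seq out) := by unfold Spec_max_purine_run_py; infer_instance

-- ===== CLAIM (what is proved, stated in full; the proofs are below) =====
def Claim_equal_max_purine_run_py : Prop := ∀ (seq : String), Dom_max_purine_run_py seq → Spec_max_purine_run_py seq (max_purine_run_py seq)


-- ===== LEMMAS AND PROOFS =====

-- common spec: maximum purine-run length by run decomposition, with accumulator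
def pvG (l : List Char) (best : Int) : Int :=
  match l with
  | [] => best
  | c :: rest =>
    if pvPurine c then
      pvG (rest.dropWhile pvPurine)
        (max best ((((c :: rest).takeWhile pvPurine).length : Int)))
    else pvG rest best
termination_by l.length
decreasing_by
  · have := (List.dropWhile_suffix (l := rest) pvPurine).length_le
    simpa using Nat.lt_succ_of_le this
  · simp

theorem pvG_cons_pos (c : Char) (rest : List Char) (best : Int) (hc : pvPurine c) :
    pvG (c :: rest) best =
      pvG ((c :: rest).dropWhile pvPurine)
        (max best ((((c :: rest).takeWhile pvPurine).length : Int))) := by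
  rw [pvG, if_pos hc, List.dropWhile_cons_of_pos hc]

-- A's step function, named for the lemmas
def pvAStep (st : Int × Int) (nt : Char) : Int × Int :=
  if pvPurine nt then (max st.1 (st.2 + 1), st.2 + 1) else (st.1, 0)

-- folding A's step over an all-purine block
theorem foldA_run (l : List Char) (m c : Int) (hcm : c ≤ m) (h : ∀ x ∈ l, pvPurine x) :
    List.foldl pvAStep (m, c) l = (max m (c + l.length), c + l.length) := by
  induction l generalizing m c with
  | nil => simp; omega
  | cons x xs ih =>
    have hx : pvPurine x := h x (by simp)
    simp only [List.foldl_cons, pvAStep, hx, if_pos]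
    rw [ih _ _ (by omega) (fun y hy => h y (by simp [hy]))]
    simp only [Prod.mk.injEq, List.length_cons]
    constructor <;> (push_cast; omega)

-- A's fold equals pvG (at a run boundary current_run = 0, and 0 <= max_run)
theorem foldA_eq_pvG : ∀ (k : Nat) (l : List Char), l.length ≤ k → ∀ m : Int, 0 ≤ m →
    (List.foldl pvAStep (m, 0) l).1 = pvG l m := by
  intro k
  induction k with
  | zero =>
    intro l hl m hm
    have : l = [] := List.eq_nil_of_length_eq_zero (Nat.le_zero.mp hl)
    subst this; simp [pvG]
  | succ k ih =>
    intro l hl m hm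
    match l with
    | [] => simp [pvG]
    | c :: rest =>
      by_cases hc : pvPurine c
      · have hdecomp := List.takeWhile_append_dropWhile (p := pvPurine) (l := c :: rest)
        have hall : ∀ x ∈ (c :: rest).takeWhile pvPurine, pvPurine x :=
          fun x hx => List.mem_takeWhile_imp hx
        have hsplit : List.foldl pvAStep (m, 0) (c :: rest) =
            List.foldl pvAStep
              (List.foldl pvAStep (m, 0) ((c :: rest).takeWhile pvPurine))
              ((c :: rest).dropWhile pvPurine) := by
          rw [← List.foldl_append, hdecomp]
        rw [hsplit, foldA_run _ m 0 hm hall, pvG_cons_pos c rest m hc]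
        have hzero : (0 : Int) + ((c :: rest).takeWhile pvPurine).length =
            (((c :: rest).takeWhile pvPurine).length : Int) := by omega
        rw [hzero]
        have hdlen : ((c :: rest).dropWhile pvPurine).length ≤ rest.length := by
          rw [List.dropWhile_cons_of_pos hc]
          exact (List.dropWhile_suffix (l := rest) pvPurine).length_le
        match hd : (c :: rest).dropWhile pvPurine with
        | [] => simp [pvG]
        | x :: xs =>
          have hxneg : ¬ pvPurine x = true := by
            have h1 := List.head_dropWhile_not pvPurine
              (l := c :: rest) (hd ▸ List.cons_ne_nil x xs)
            simpa [hd] using h1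
          rw [List.foldl_cons]
          have hstep : pvAStep
              (max m (((c :: rest).takeWhile pvPurine).length : Int),
               (((c :: rest).takeWhile pvPurine).length : Int)) x =
              (max m (((c :: rest).takeWhile pvPurine).length : Int), 0) := by
            simp [pvAStep, hxneg]
          rw [hstep, pvG, if_neg hxneg]
          have hxs : xs.length ≤ k := by
            rw [hd] at hdlen
            simp only [List.length_cons] at hdlen hl
            omega
          exact ih xs hxs _ (by positivity)
      · rw [List.foldl_cons]
        have hstep : pvAStep (m, 0) c = (m, 0) := by simp [pvAStep, hc]
        rw [hstep, pvG, if_neg hc]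
        exact ih rest (by simpa using hl) m hm

-- pvInner characterised by takeWhile
theorem pvInner_eq (l : List Char) (j : Nat) :
    j ≤ l.length → pvInner l l.length j = j + ((l.drop j).takeWhile pvPurine).length := by
  induction j using pvInner.induct l l.length with
  | case1 j h ih =>
    intro hj
    obtain ⟨hjn, hp⟩ := h
    rw [pvInner, dif_pos ⟨hjn, hp⟩, ih (by omega)]
    rw [List.getD_eq_getElem l ' ' hjn] at hp
    rw [List.drop_eq_getElem_cons hjn, List.takeWhile_cons_of_pos hp]
    simp; omega
  | case2 j h =>
    intro hj
    rw [pvInner, dif_neg h]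
    by_cases hjn : j < l.length
    · have hp : ¬ pvPurine (l.getD j ' ') = true := fun hp => h ⟨hjn, hp⟩
      rw [List.getD_eq_getElem l ' ' hjn] at hp
      rw [List.drop_eq_getElem_cons hjn, List.takeWhile_cons_of_neg hp]
      simp
    · have : j = l.length := by omega
      subst this; simp
  
theorem pv_drop_takeWhile_len (p : Char → Bool) (L : List Char) :
    L.drop (L.takeWhile p).length = L.dropWhile p := by
  induction L with
  | nil => simp
  | cons a t ih => by_cases hpa : p a <;> simp [hpa, ih]

-- pvOuter equals pvG
theorem pvOuter_eq_pvG (l : List Char) (best : Int) (i : Nat) :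
    i ≤ l.length → pvOuter l l.length best i = pvG (l.drop i) best := by
  induction best, i using pvOuter.induct l l.length with
  | case1 best i h hp j ih =>
    intro hi
    rw [pvOuter]
    simp only [dif_pos h, dif_pos hp]
    have hpj : pvPurine l[i] := by rwa [List.getD_eq_getElem l ' ' h] at hp
    have hinner := pvInner_eq l i (by omega)
    have hj : j = pvInner l l.length i := rfl
    rw [hj, hinner] at ih
    set r := ((l.drop i).takeWhile pvPurine).length with hr
    have hrle : r ≤ (l.drop i).length :=
      (List.takeWhile_prefix (l := l.drop i) pvPurine).length_le
    have hlen : (l.drop i).length = l.length - i := by simp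
    rw [hinner]
    rw [ih (by omega)]
    have hdropj : l.drop (i + r) = (l.drop i).dropWhile pvPurine := by
      rw [← List.drop_drop, hr]
      exact pv_drop_takeWhile_len pvPurine (l.drop i)
    rw [hdropj]
    have hdi : l.drop i = l[i] :: l.drop (i + 1) := List.drop_eq_getElem_cons h
    rw [hdi, pvG_cons_pos _ _ _ hpj, ← hdi]
    have hcast : ((i + r : Nat) : Int) - (i : Int) = (r : Int) := by push_cast; omega
    rw [hcast]
  | case2 best i h hp ih =>
    intro hi
    rw [pvOuter]
    simp only [dif_pos h, dif_neg hp]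
    have hpj : ¬ pvPurine l[i] = true := by rwa [List.getD_eq_getElem l ' ' h] at hp
    rw [ih (by omega), List.drop_eq_getElem_cons h, pvG, if_neg hpj]
  | case3 best i h =>
    intro hi
    have hil : i = l.length := by omega
    subst hil
    rw [pvOuter, dif_neg h]
    simp [List.drop_length, pvG]

-- ===== VERDICT (by name: the statement is the Claim_ definition above) =====
theorem max_purine_run_py_spec : Claim_equal_max_purine_run_py := by
  intro seq _
  unfold Spec_max_purine_run_py max_purine_run_py max_purine_run_py_alt
  have hA : (List.foldl pvAStep (0, 0) seq.toList).1 = pvG seq.toList 0 :=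
    foldA_eq_pvG seq.toList.length seq.toList le_rfl 0 le_rfl
  have hB : pvOuter seq.toList seq.toList.length 0 0 = pvG seq.toList 0 := by
    simpa using pvOuter_eq_pvG seq.toList 0 0 (Nat.zero_le _)
  rw [hB, ← hA]; rfl
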